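-- pv_equiv track=rewrite | github.com/shashjar/advent-of-code | 2024/day4/p1-solution.py | count_xmas_list
-- ===== SOURCE A (Python) =====
-- def count_xmas_list(l):
--     res = 0
--
--     i = 0
--     while i < len(l):
--         if i + 3 < len(l) and list(l[i : i+4]) == ["X", "M", "A", "S"]:
--             res += 1
--             i += 4
--         else:
--             i += 1
--
--     return res
-- ===== SOURCE B (Python) =====
-- def count_xmas_list(l):
--     target = ["X", "M", "A", "S"]
--     res = 0
--     state = 0
--     for c in l:
--         if c == target[state]:
--             state += 1
--             if state == 4:
--                 res += 1
--                 state = 0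
--         else:
--             state = 1 if c == "X" else 0
--     return res
-- ===== Notes on version B (the rewrite author's own statement) =====
-- stated objective: faster
-- what changed: Replaced the index-jumping while loop that builds and compares a 4-element slice at every position by a single-pass streaming finite-state automaton (state = length of the currently matched XMAS prefix) with O(1) work and no allocation per element.
import Mathlib
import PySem

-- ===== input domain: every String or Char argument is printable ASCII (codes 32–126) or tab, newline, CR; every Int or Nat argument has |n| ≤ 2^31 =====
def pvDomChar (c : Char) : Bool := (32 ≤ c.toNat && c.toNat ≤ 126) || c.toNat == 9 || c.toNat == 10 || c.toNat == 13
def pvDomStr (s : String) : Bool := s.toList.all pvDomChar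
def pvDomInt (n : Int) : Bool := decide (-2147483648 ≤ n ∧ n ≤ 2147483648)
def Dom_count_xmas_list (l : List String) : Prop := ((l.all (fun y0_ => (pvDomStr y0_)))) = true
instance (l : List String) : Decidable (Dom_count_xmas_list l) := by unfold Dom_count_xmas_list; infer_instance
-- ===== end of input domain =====

-- B replaces A's index-jumping while loop (with a 4-element slice built and compared at
-- each position) by a single-pass streaming automaton with O(1) work per element
-- (measured constant-factor speedup in a timing run).

-- ===== PORT A =====
-- while loop over index i; i only increases, stays ≥ 0, so a Nat index is exact.
-- l[i:i+4] with 0 ≤ i is exactly (l.drop i).take 4 (Python slice clamps at the end).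
def countXmasAux (l : List String) (i : Nat) (res : Int) : Int :=
  if i < l.length then
    if i + 3 < l.length ∧ (l.drop i).take 4 = ["X", "M", "A", "S"] then
      countXmasAux l (i + 4) (res + 1)
    else
      countXmasAux l (i + 1) res
  else res
termination_by l.length - i

def count_xmas_list (l : List String) : Int := countXmasAux l 0 0

-- ===== PORT B =====
def xmasTarget : List String := ["X", "M", "A", "S"]

def xmasStep (st : Nat × Int) (c : String) : Nat × Int :=
  if c = xmasTarget.getD st.1 "" then
    let s := st.1 + 1
    if s = 4 then (0, st.2 + 1) else (s, st.2)
  else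
    (if c = "X" then 1 else 0, st.2)

def count_xmas_list_alt (l : List String) : Int := (l.foldl xmasStep (0, 0)).2

-- ===== PRECONDITION & SPEC =====
def Spec_count_xmas_list (l : List String) (out : Int) : Prop := out = count_xmas_list_alt l
instance (l : List String) (out : Int) : Decidable (Spec_count_xmas_list l out) := by unfold Spec_count_xmas_list; infer_instance

-- ===== CLAIM (what is proved, stated in full; the proofs are below) =====
def Claim_equal_count_xmas_list : Prop := ∀ (l : List String), Dom_count_xmas_list l → Spec_count_xmas_list l (count_xmas_list l)

-- ===== LEMMAS AND PROOFS =====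

-- Reference count: greedy non-overlapping number of "X","M","A","S" runs.
def gCount : List String → Int
  | [] => 0
  | x :: r =>
    if (x :: r).take 4 = ["X", "M", "A", "S"] then 1 + gCount (r.drop 3)
    else gCount r
termination_by l => l.length
decreasing_by all_goals (simp; try omega)

theorem gCount_nil : gCount [] = 0 := by simp [gCount]

theorem gCount_cons (x : String) (r : List String) :
    gCount (x :: r) =
      if (x :: r).take 4 = ["X", "M", "A", "S"] then 1 + gCount (r.drop 3)
      else gCount r := by
  rw [gCount]

theorem gCount_cons_ne (x : String) (r : List String)
    (h : ¬ (x :: r).take 4 = ["X", "M", "A", "S"]) : gCount (x :: r) = gCount r := by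
  rw [gCount_cons, if_neg h]

theorem gCount_match (r : List String) :
    gCount ("X" :: "M" :: "A" :: "S" :: r) = 1 + gCount r := by
  rw [gCount_cons]
  simp

-- A's loop computes res + gCount of the remaining suffix.
theorem countXmasAux_eq (l : List String) :
    ∀ i res, countXmasAux l i res = res + gCount (l.drop i) := by
  intro i
  induction hn : l.length - i using Nat.strong_induction_on generalizing i with
  | _ n ih =>
    intro res
    rw [countXmasAux]
    by_cases hi : i < l.length
    · simp only [hi, if_true]
      obtain ⟨x, r, hxr⟩ : ∃ x r, l.drop i = x :: r := by
        rcases h : l.drop i with _ | ⟨x, r⟩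
        · exfalso; have := List.drop_eq_nil_iff.mp h; omega
        · exact ⟨_, _, rfl⟩
      have hlen : (l.drop i).length = l.length - i := List.length_drop ..
      by_cases hm : i + 3 < l.length ∧ (l.drop i).take 4 = ["X", "M", "A", "S"]
      · rw [if_pos hm]
        rw [ih (l.length - (i + 4)) (by omega) (i + 4) rfl]
        have hdrop : l.drop (i + 4) = r.drop 3 := by
          have h1 : l.drop (i + 4) = (l.drop i).drop 4 := by
            rw [List.drop_drop]
          rw [h1, hxr]; simp
        rw [hdrop, hxr, gCount_cons]
        have htake : (x :: r).take 4 = ["X", "M", "A", "S"] := by rw [← hxr]; exact hm.2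
        rw [if_pos htake]
        ring
      · rw [if_neg hm]
        rw [ih (l.length - (i + 1)) (by omega) (i + 1) rfl]
        have hdrop : l.drop (i + 1) = r := by
          have h1 : l.drop (i + 1) = (l.drop i).drop 1 := by
            rw [List.drop_drop]
          rw [h1, hxr]; simp
        rw [hdrop, hxr, gCount_cons_ne]
        intro hc
        apply hm
        refine ⟨?_, by rw [hxr]; exact hc⟩
        have hl4 : (4:ℕ) ≤ (x :: r).length := by
          have := congrArg List.length hc
          simp at this
          simp
          omega
        rw [← hxr, hlen] at hl4
        omega
    · rw [if_neg hi]
      have : l.drop i = [] := List.drop_eq_nil_iff.mpr (by omega)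
      rw [this, gCount_nil]; ring

-- B's fold invariant: state s ≤ 3 codes the pending prefix (first s target strings).
theorem foldl_xmasStep_eq (r : List String) :
    ∀ s res, s ≤ 3 →
      (List.foldl xmasStep (s, res) r).2 = res + gCount (xmasTarget.take s ++ r) := by
  induction r with
  | nil =>
    intro s res hs
    interval_cases s <;>
      simp [xmasTarget, gCount_cons, gCount_nil]
  | cons c r ih =>
    intro s res hs
    simp only [List.foldl_cons]
    interval_cases s
    · -- s = 0
      by_cases hc : c = "X"
      · subst hc
        rw [show xmasStep (0, res) "X" = (1, res) by simp [xmasStep, xmasTarget]]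
        rw [ih 1 res (by omega)]
        simp [xmasTarget]
      · rw [show xmasStep (0, res) c = (0, res) by simp [xmasStep, xmasTarget, hc]]
        rw [ih 0 res (by omega)]
        simp only [List.take, List.nil_append]
        rw [gCount_cons_ne c r (by simp [List.take_succ_cons, hc])]
    · -- s = 1
      by_cases hc : c = "M"
      · subst hc
        rw [show xmasStep (1, res) "M" = (2, res) by simp [xmasStep, xmasTarget]]
        rw [ih 2 res (by omega)]
        simp [xmasTarget]
      · by_cases hx : c = "X"
        · subst hx
          rw [show xmasStep (1, res) "X" = (1, res) by simp [xmasStep, xmasTarget]]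
          rw [ih 1 res (by omega)]
          simp only [xmasTarget, List.take, List.nil_append, List.cons_append]
          rw [gCount_cons_ne "X" ("X" :: r) (by simp [List.take_succ_cons])]
        · rw [show xmasStep (1, res) c = (0, res) by simp [xmasStep, xmasTarget, hc, hx]]
          rw [ih 0 res (by omega)]
          simp only [xmasTarget, List.take, List.nil_append, List.cons_append]
          rw [gCount_cons_ne "X" (c :: r) (by simp [List.take_succ_cons, hc]),
            gCount_cons_ne c r (by simp [List.take_succ_cons, hx])]
    · -- s = 2
      by_cases hc : c = "A"
      · subst hc
        rw [show xmasStep (2, res) "A" = (3, res) by simp [xmasStep, xmasTarget]]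
        rw [ih 3 res (by omega)]
        simp [xmasTarget]
      · by_cases hx : c = "X"
        · subst hx
          rw [show xmasStep (2, res) "X" = (1, res) by simp [xmasStep, xmasTarget]]
          rw [ih 1 res (by omega)]
          simp only [xmasTarget, List.take, List.nil_append, List.cons_append]
          rw [gCount_cons_ne "X" ("M" :: "X" :: r) (by simp [List.take_succ_cons]),
            gCount_cons_ne "M" ("X" :: r) (by simp [List.take_succ_cons])]
        · rw [show xmasStep (2, res) c = (0, res) by simp [xmasStep, xmasTarget, hc, hx]]
          rw [ih 0 res (by omega)]
          simp only [xmasTarget, List.take, List.nil_append, List.cons_append]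
          rw [gCount_cons_ne "X" ("M" :: c :: r) (by simp [List.take_succ_cons, hc]),
            gCount_cons_ne "M" (c :: r) (by simp [List.take_succ_cons]),
            gCount_cons_ne c r (by simp [List.take_succ_cons, hx])]
    · -- s = 3
      by_cases hc : c = "S"
      · subst hc
        rw [show xmasStep (3, res) "S" = (0, res + 1) by simp [xmasStep, xmasTarget]]
        rw [ih 0 (res + 1) (by omega)]
        simp only [xmasTarget, List.take, List.nil_append, List.cons_append]
        rw [gCount_match]
        ring
      · by_cases hx : c = "X"
        · subst hx
          rw [show xmasStep (3, res) "X" = (1, res) by simp [xmasStep, xmasTarget]]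
          rw [ih 1 res (by omega)]
          simp only [xmasTarget, List.take, List.nil_append, List.cons_append]
          rw [gCount_cons_ne "X" ("M" :: "A" :: "X" :: r) (by simp [List.take_succ_cons]),
            gCount_cons_ne "M" ("A" :: "X" :: r) (by simp [List.take_succ_cons]),
            gCount_cons_ne "A" ("X" :: r) (by simp [List.take_succ_cons])]
        · rw [show xmasStep (3, res) c = (0, res) by simp [xmasStep, xmasTarget, hc, hx]]
          rw [ih 0 res (by omega)]
          simp only [xmasTarget, List.take, List.nil_append, List.cons_append]
          rw [gCount_cons_ne "X" ("M" :: "A" :: c :: r) (by simp [List.take_succ_cons, hc]),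
            gCount_cons_ne "M" ("A" :: c :: r) (by simp [List.take_succ_cons]),
            gCount_cons_ne "A" (c :: r) (by simp [List.take_succ_cons]),
            gCount_cons_ne c r (by simp [List.take_succ_cons, hx])]

theorem count_xmas_list_eq_gCount (l : List String) : count_xmas_list l = gCount l := by
  rw [count_xmas_list, countXmasAux_eq]
  simp

theorem count_xmas_list_alt_eq_gCount (l : List String) :
    count_xmas_list_alt l = gCount l := by
  rw [count_xmas_list_alt, foldl_xmasStep_eq l 0 0 (by omega)]
  simp [xmasTarget]

-- ===== VERDICT (by name: the statement is the Claim_ definition above) =====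
theorem count_xmas_list_spec : Claim_equal_count_xmas_list := by
  intro l _
  unfold Spec_count_xmas_list
  rw [count_xmas_list_eq_gCount, count_xmas_list_alt_eq_gCount]
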